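-- pv_equiv track=rewrite | github.com/GuyDorveilMALONGA/whatsapp-agent | validate_durations.py | _interpolate_times
-- ===== SOURCE A (Python) =====
-- MIN_SEG_S       = 20      # < 20s → aberrant (bus téléporteur)
--
-- MAX_SEG_S       = 600     # > 600s → aberrant (10 min entre 2 arrêts = probablement concat aller+retour)
--
-- FALLBACK_S      = 120     # valeur par défaut si interpolation impossible
--
-- def _interpolate_times(arrets: list[dict], ligne_id: str) -> tuple[list[dict], int]:
--     """
--     Remplace les temps aberrants (None inclus) par interpolation linéaire
--     entre les voisins valides les plus proches.
--     Retourne (arrets_corrigés, nb_corrections).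
--     """
--     n = len(arrets)
--     times = [a.get("temps_vers_suivant_sec") for a in arrets]
--     # Dernier arrêt n'a pas de suivant — on l'ignore
--     fixed = list(times)
--     nb_fix = 0
--
--     def is_bad(t) -> bool:
--         return t is None or t < MIN_SEG_S or t > MAX_SEG_S
--
--     # Identification des indices à corriger (sauf dernier)
--     bad_indices = [i for i in range(n - 1) if is_bad(fixed[i])]
--
--     for idx in bad_indices:
--         # Chercher voisin gauche valide
--         left_val, left_dist = None, 0
--         for k in range(idx - 1, -1, -1):
--             if k == n - 1:  # dernier arrêt → pas de temps
--                 continue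
--             if not is_bad(fixed[k]):
--                 left_val = fixed[k]
--                 left_dist = idx - k
--                 break
--
--         # Chercher voisin droit valide
--         right_val, right_dist = None, 0
--         for k in range(idx + 1, n - 1):
--             if not is_bad(fixed[k]):
--                 right_val = fixed[k]
--                 right_dist = k - idx
--                 break
--
--         if left_val is not None and right_val is not None:
--             # Interpolation pondérée par distance
--             total_dist = left_dist + right_dist
--             interp = round(
--                 (left_val * right_dist + right_val * left_dist) / total_dist
--             )
--         elif left_val is not None:
--             interp = left_val
--         elif right_val is not None:
--             interp = right_val
--         else:
--             interp = FALLBACK_S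
--
--         # Clamp pour éviter de générer de nouveaux aberrants
--         interp = max(MIN_SEG_S, min(interp, MAX_SEG_S))
--         fixed[idx] = interp
--         nb_fix += 1
--
--     # Reconstruire les arrêts
--     new_arrets = []
--     for i, arret in enumerate(arrets):
--         a = dict(arret)
--         if i < n - 1:
--             a["temps_vers_suivant_sec"] = fixed[i]
--         new_arrets.append(a)
--
--     return new_arrets, nb_fix
-- ===== SOURCE B (Python) =====
-- MIN_SEG_S = 20
-- MAX_SEG_S = 600
-- FALLBACK_S = 120
--
-- def _interpolate_times(arrets: list[dict], ligne_id: str) -> tuple[list[dict], int]: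
--     """Repair of aberrant segment durations in two linear passes: a backward pass
--     precomputes, for each slot, the distance to and value of the nearest valid
--     original time on its right; the left valid neighbour is always the previous
--     (already repaired) slot, maintained incrementally in the forward pass."""
--     n = len(arrets)
--     times = [a.get("temps_vers_suivant_sec") for a in arrets]
--
--     def ok(t) -> bool:
--         return t is not None and MIN_SEG_S <= t <= MAX_SEG_S
--
--     # backward pass over the n-1 interpolatable slots:
--     # nxt[i] = (d, v): the nearest valid original time right of slot i is v, d slots away
--     nxt_rev = []
--     nv = None
--     for t in reversed(times[:n - 1]):
--         nxt_rev.append(nv)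
--         if ok(t):
--             nv = (1, t)
--         elif nv is not None:
--             nv = (nv[0] + 1, nv[1])
--     nxt = nxt_rev[::-1]
--
--     fixed = []
--     prev = None  # last (valid) value to the left, maintained incrementally
--     nb_fix = 0
--     for t, rn in zip(times, nxt):
--         if not ok(t):
--             if prev is not None and rn is not None:
--                 d, v = rn
--                 t = _round_div(prev * d + v, 1 + d)
--             elif prev is not None:
--                 t = prev
--             elif rn is not None:
--                 t = rn[1]
--             else:
--                 t = FALLBACK_S
--             t = max(MIN_SEG_S, min(t, MAX_SEG_S))
--             nb_fix += 1
--         fixed.append(t)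
--         prev = t
--
--     out = [{**dict(a), "temps_vers_suivant_sec": t} for a, t in zip(arrets, fixed)]
--     if n > 0:
--         out.append(dict(arrets[-1]))
--     return out, nb_fix
--
-- def _round_div(num: int, den: int) -> int:
--     # round(num/den) with ties to even, in exact integer arithmetic (den > 0)
--     q, r = divmod(num, den)
--     if 2 * r < den:
--         return q
--     if 2 * r > den:
--         return q + 1
--     return q if q % 2 == 0 else q + 1
-- ===== Notes on version B (the rewrite author's own statement) =====
-- stated objective: alternative
-- what changed: Replaces A's per-bad-index neighbour scans (a left scan and a right scan inside the repair loop) with one backward pass precomputing distance/value of the nearest valid right neighbour and one forward pass maintaining the left neighbour incrementally, with exact integer half-to-even rounding instead of float round.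
import Mathlib
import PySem

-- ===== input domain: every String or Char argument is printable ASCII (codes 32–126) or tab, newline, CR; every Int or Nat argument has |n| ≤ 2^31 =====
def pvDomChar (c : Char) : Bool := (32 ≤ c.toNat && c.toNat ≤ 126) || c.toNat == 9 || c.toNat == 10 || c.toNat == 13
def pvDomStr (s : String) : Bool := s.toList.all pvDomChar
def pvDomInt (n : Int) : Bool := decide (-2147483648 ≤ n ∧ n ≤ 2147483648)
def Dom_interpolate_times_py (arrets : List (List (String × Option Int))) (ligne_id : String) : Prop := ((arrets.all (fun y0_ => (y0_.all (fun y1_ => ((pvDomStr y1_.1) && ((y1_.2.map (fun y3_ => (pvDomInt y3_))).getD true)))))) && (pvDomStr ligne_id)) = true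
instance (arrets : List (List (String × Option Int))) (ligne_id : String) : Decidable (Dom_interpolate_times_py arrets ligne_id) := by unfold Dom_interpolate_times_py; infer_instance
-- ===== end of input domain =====

-- B re-implements A's repair by two linear passes (nearest valid right neighbour
-- precomputed backward, left neighbour maintained incrementally) instead of A's
-- per-bad-index left/right neighbour scans; return values are proved identical.

-- shared primitive: Python round(num/den) for den > 0, as exact round-half-to-even of the
-- rational num/den (A's float quotient rounds to the same integer on the operand ranges
-- both programs produce: quotients in [20, 600] with denominators ≤ len(arrets)).
def pvRoundDiv (num den : Int) : Int :=
  let q := PySem.Int.floordiv num den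
  let r := num - q * den
  if 2 * r < den then q
  else if den < 2 * r then q + 1
  else if PySem.Int.mod q 2 = 0 then q else q + 1

-- shared: a.get("temps_vers_suivant_sec") (missing key and stored None both give none)
def pvGetTime (a : List (String × Option Int)) : Option Int :=
  ((PySem.Dict.ofList a).get? "temps_vers_suivant_sec").bind id

-- ===== PORT A =====
def pvBadA : Option Int → Bool
  | none => true
  | some v => decide (v < 20) || decide (600 < v)

-- `for k in range(idx-1, -1, -1): …` left-neighbour scan (with the k == n-1 skip)
def pvLeftA (n idx : Int) (fixed : List (Option Int)) : List Int → Option Int × Int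
  | [] => (none, 0)
  | k :: ks =>
    if k = n - 1 then pvLeftA n idx fixed ks
    else if !pvBadA (PySem.List.pyGetD fixed k none) then (PySem.List.pyGetD fixed k none, idx - k)
    else pvLeftA n idx fixed ks

-- `for k in range(idx+1, n-1): …` right-neighbour scan
def pvRightA (idx : Int) (fixed : List (Option Int)) : List Int → Option Int × Int
  | [] => (none, 0)
  | k :: ks =>
    if !pvBadA (PySem.List.pyGetD fixed k none) then (PySem.List.pyGetD fixed k none, k - idx)
    else pvRightA idx fixed ks

-- body of `for idx in bad_indices`
def pvStepA (n : Int) (st : List (Option Int) × Int) (idx : Int) : List (Option Int) × Int :=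
  let lr := pvLeftA n idx st.1 (PySem.List.pyRange (idx - 1) (-1) (-1))
  let rr := pvRightA idx st.1 (PySem.List.pyRange (idx + 1) (n - 1) 1)
  let interp : Int :=
    match lr.1, rr.1 with
    | some l, some r => pvRoundDiv (l * rr.2 + r * lr.2) (lr.2 + rr.2)
    | some l, none => l
    | none, some r => r
    | none, none => 120
  let interp := max 20 (min interp 600)
  (PySem.List.pySetD st.1 idx (some interp), st.2 + 1)

def interpolate_times_py (arrets : List (List (String × Option Int))) (ligne_id : String) : (List (List (String × Option Int))) × Int :=
  let n : Int := arrets.length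
  let times := arrets.map pvGetTime
  let bad_indices := (PySem.List.pyRange 0 (n - 1) 1).filter (fun i => pvBadA (PySem.List.pyGetD times i none))
  let res := bad_indices.foldl (pvStepA n) (times, 0)
  let new_arrets := (PySem.List.enumerate arrets).foldl (fun acc p =>
      let a := PySem.Dict.ofList p.2
      let a := if p.1 < n - 1 then a.insert "temps_vers_suivant_sec" (PySem.List.pyGetD res.1 p.1 none) else a
      acc ++ [a.items]) ([] : List (List (String × Option Int)))
  (new_arrets, res.2)

-- ===== PORT B =====
def pvOkB : Option Int → Bool
  | none => false
  | some v => decide (20 ≤ v) && decide (v ≤ 600)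

-- backward pass of Source B: iterate reversed(times[:n-1]), append nv, update nv; final [::-1]
def pvNxtB (core : List (Option Int)) : List (Option (Int × Int)) :=
  ((core.reverse.foldl (fun (st : Option (Int × Int) × List (Option (Int × Int))) t =>
      (if pvOkB t then t.map (fun v => (1, v))
       else match st.1 with | some dv => some (dv.1 + 1, dv.2) | none => none,
       st.2 ++ [st.1])) (none, [])).2).reverse

-- forward pass of Source B over zip(times, nxt), carrying prev
def pvFwdB (prev : Option Int) : List (Option Int × Option (Int × Int)) → List (Option Int) × Int
  | [] => ([], 0)
  | (t, rn) :: rest =>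
    if pvOkB t then
      let res := pvFwdB t rest
      (t :: res.1, res.2)
    else
      let v : Int :=
        match prev, rn with
        | some p, some dv => pvRoundDiv (p * dv.1 + dv.2) (1 + dv.1)
        | some p, none => p
        | none, some dv => dv.2
        | none, none => 120
      let t' : Option Int := some (max 20 (min v 600))
      let res := pvFwdB t' rest
      (t' :: res.1, res.2 + 1)

def interpolate_times_py_alt (arrets : List (List (String × Option Int))) (ligne_id : String) : (List (List (String × Option Int))) × Int :=
  let n : Int := arrets.length
  let times := arrets.map pvGetTime
  let nxt := pvNxtB (PySem.List.slice times none (some (n - 1)))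
  let res := pvFwdB none (List.zip times nxt)
  let out := (List.zip arrets res.1).map (fun p => ((PySem.Dict.ofList p.1).insert "temps_vers_suivant_sec" p.2).items)
  let out := match PySem.List.pyGet? arrets (-1) with
    | some a => out ++ [(PySem.Dict.ofList a).items]
    | none => out
  (out, res.2)

-- ===== PRECONDITION & SPEC =====
def Spec_interpolate_times_py (arrets : List (List (String × Option Int))) (ligne_id : String) (out : (List (List (String × Option Int))) × Int) : Prop := out = interpolate_times_py_alt arrets ligne_id
instance (arrets : List (List (String × Option Int))) (ligne_id : String) (out : (List (List (String × Option Int))) × Int) : Decidable (Spec_interpolate_times_py arrets ligne_id out) := by unfold Spec_interpolate_times_py; infer_instance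

-- ===== CLAIM (what is proved, stated in full; the proofs are below) =====
def Claim_equal_interpolate_times_py : Prop := ∀ (arrets : List (List (String × Option Int))) (ligne_id : String), Dom_interpolate_times_py arrets ligne_id → Spec_interpolate_times_py arrets ligne_id (interpolate_times_py arrets ligne_id)

-- ===== LEMMAS AND PROOFS =====

-- common mathematical description of the repaired core (indices 0 .. n-2):
-- distance (1-based) to, and value of, the first valid entry of a suffix
def pvFirstOk : List (Option Int) → Option (Int × Int)
  | [] => none
  | t :: rest =>
    if pvOkB t then t.map (fun v => (1, v))
    else (pvFirstOk rest).map (fun dv => (dv.1 + 1, dv.2))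

def pvCombine (prev : Option Int) (fo : Option (Int × Int)) : Int :=
  match prev, fo with
  | some p, some dv => pvRoundDiv (p * dv.1 + dv.2) (1 + dv.1)
  | some p, none => p
  | none, some dv => dv.2
  | none, none => 120

def pvSpec (prev : Option Int) : List (Option Int) → List (Option Int) × Int
  | [] => ([], 0)
  | t :: rest =>
    if pvOkB t then
      let r := pvSpec t rest
      (t :: r.1, r.2)
    else
      let t' : Option Int := some (max 20 (min (pvCombine prev (pvFirstOk rest)) 600))
      let r := pvSpec t' rest
      (t' :: r.1, r.2 + 1)

-- A's bad-index list, described structurally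
def pvBadIdx (i : Int) : List (Option Int) → List Int
  | [] => []
  | t :: rest => if pvBadA t then i :: pvBadIdx (i + 1) rest else pvBadIdx (i + 1) rest

theorem pvOk_eq_not_bad (t : Option Int) : pvOkB t = !pvBadA t := by
  cases t with
  | none => rfl
  | some v =>
    show (decide (20 ≤ v) && decide (v ≤ 600)) = !(decide (v < 20) || decide (600 < v))
    rw [Bool.eq_iff_iff]; simp

theorem pvSpec_len (prev : Option Int) (S : List (Option Int)) : (pvSpec prev S).1.length = S.length := by
  induction S generalizing prev with
  | nil => rfl
  | cons t rest ih => by_cases h : pvOkB t = true <;> simp only [pvSpec, h] <;> simp [ih]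

-- B-side: the backward fold computes pvFirstOk on every suffix
def pvNxtG (nv0 : Option (Int × Int)) : List (Option Int) → List (Option (Int × Int)) × Option (Int × Int)
  | [] => ([], nv0)
  | t :: rest =>
    let r := pvNxtG nv0 rest
    (r.2 :: r.1,
     if pvOkB t then t.map (fun v => (1, v))
     else match r.2 with | some dv => some (dv.1 + 1, dv.2) | none => none)

def pvNxtL : List (Option Int) → List (Option (Int × Int))
  | [] => []
  | t :: rest => pvFirstOk rest :: pvNxtL rest

theorem pvNxtG_fold (core : List (Option Int)) (st : Option (Int × Int) × List (Option (Int × Int))) :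
    core.reverse.foldl (fun (st : Option (Int × Int) × List (Option (Int × Int))) t =>
      (if pvOkB t then t.map (fun v => (1, v))
       else match st.1 with | some dv => some (dv.1 + 1, dv.2) | none => none,
       st.2 ++ [st.1])) st
    = ((pvNxtG st.1 core).2, st.2 ++ ((pvNxtG st.1 core).1).reverse) := by
  induction core generalizing st with
  | nil => simp [pvNxtG]
  | cons t rest ih =>
    rw [List.reverse_cons, List.foldl_append, ih st]
    simp [pvNxtG]

theorem pvNxtG_none (core : List (Option Int)) :
    pvNxtG none core = (pvNxtL core, pvFirstOk core) := by
  induction core with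
  | nil => rfl
  | cons t rest ih =>
    simp only [pvNxtG, pvNxtL, pvFirstOk, ih]
    by_cases h : pvOkB t = true
    · simp [h]
    · simp only [h, if_false, Bool.false_eq_true]
      cases pvFirstOk rest <;> simp

theorem pvNxtB_eq (core : List (Option Int)) : pvNxtB core = pvNxtL core := by
  unfold pvNxtB
  rw [pvNxtG_fold core (none, [])]
  simp [pvNxtG_none]

theorem pvFwdB_eq_spec (core : List (Option Int)) (prev : Option Int) :
    pvFwdB prev (List.zip core (pvNxtL core)) = pvSpec prev core := by
  induction core generalizing prev with
  | nil => rfl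
  | cons t rest ih =>
    show pvFwdB prev ((t, pvFirstOk rest) :: List.zip rest (pvNxtL rest)) = pvSpec prev (t :: rest)
    by_cases h : pvOkB t = true <;> simp only [pvFwdB, pvSpec, pvCombine, h, if_true, if_false, Bool.false_eq_true] <;> simp [ih]

-- A-side: the bad-index list only reads the unprocessed suffix
theorem pvBadIdx_eq_filter (S : List (Option Int)) : ∀ (X T : List (Option Int)),
    (PySem.List.pyRange (X.length : Int) ((X.length : Int) + (S.length : Int)) 1).filter
      (fun k => pvBadA (PySem.List.pyGetD (X ++ S ++ T) k none))
    = pvBadIdx (X.length : Int) S := by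
  induction S with
  | nil => intro X T; simp [PySem.List.pyRange_one_eq_nil, pvBadIdx]
  | cons t rest ih =>
    intro X T
    have h1 : (X.length : Int) < (X.length : Int) + (((t :: rest).length : Nat) : Int) := by
      simp
    rw [PySem.List.pyRange_one_cons h1]
    have h2 : PySem.List.pyGetD (X ++ (t :: (rest ++ T))) (X.length : Int) none = t := by
      simp [PySem.List.pyGetD, PySem.List.pyGet?_append_length]
    have ih' := ih (X ++ [t]) T
    simp only [List.filter_cons, h2, List.length_append, List.length_cons, List.length_nil,
      Nat.cast_add, Nat.cast_one, Nat.cast_zero, List.append_assoc, List.cons_append, List.singleton_append, List.nil_append] at ih' ⊢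
    rw [show ((X.length : Int) + (0 + 1)) = (X.length : Int) + 1 by ring,
        show (X.length : Int) + 1 + (rest.length : Int) = (X.length : Int) + ((rest.length : Int) + 1) by ring] at ih'
    rw [ih']
    simp only [h2, pvBadIdx]

-- A-side: right scan returns the first valid entry of the suffix
theorem pvRightA_eq (S : List (Option Int)) : ∀ (X T : List (Option Int)) (idx : Int),
    pvRightA idx (X ++ S ++ T) (PySem.List.pyRange (X.length : Int) ((X.length : Int) + (S.length : Int)) 1)
    = (match pvFirstOk S with
      | some dv => (some dv.2, ((X.length : Int) - idx - 1) + dv.1)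
      | none => (none, 0)) := by
  induction S with
  | nil => intro X T idx; simp [PySem.List.pyRange_one_eq_nil, pvRightA, pvFirstOk]
  | cons t rest ih =>
    intro X T idx
    have h1 : (X.length : Int) < (X.length : Int) + (((t :: rest).length : Nat) : Int) := by
      simp
    rw [PySem.List.pyRange_one_cons h1]
    have h2 : PySem.List.pyGetD (X ++ (t :: (rest ++ T))) (X.length : Int) none = t := by
      simp [PySem.List.pyGetD]
    have ih' := ih (X ++ [t]) T idx
    simp only [List.length_append, List.length_cons, List.length_nil,
      Nat.cast_add, Nat.cast_one, Nat.cast_zero, List.append_assoc, List.cons_append,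
      List.singleton_append, List.nil_append] at ih' ⊢
    rw [show ((X.length : Int) + (0 + 1)) = (X.length : Int) + 1 by ring,
        show (X.length : Int) + 1 + (rest.length : Int) = (X.length : Int) + ((rest.length : Int) + 1) by ring] at ih'
    simp only [pvRightA, h2]
    by_cases hb : pvBadA t = true
    · simp only [hb, Bool.not_true, if_false, Bool.false_eq_true, ih', pvFirstOk, pvOk_eq_not_bad, hb]
      cases pvFirstOk rest with
      | none => rfl
      | some dv => simp; try ring
    · have hb' : pvBadA t = false := by revert hb; cases pvBadA t <;> simp
      simp only [hb', Bool.not_false, if_true, pvFirstOk, pvOk_eq_not_bad]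
      cases t with
      | none => simp [pvBadA] at hb'
      | some v => simp; try ring

-- A-side: left scan returns the last element of the (all-valid) processed prefix
theorem pvLeftA_eq (P : List (Option Int)) (rest : List (Option Int)) (n : Int)
    (hok : ∀ x ∈ P, pvOkB x = true) (hn : (P.length : Int) < n - 1) :
    pvLeftA n (P.length : Int) (P ++ rest) (PySem.List.pyRange ((P.length : Int) - 1) (-1) (-1))
    = if P = [] then (none, 0) else (P.getLast?.getD none, 1) := by
  rcases List.eq_nil_or_concat P with rfl | ⟨Q, y, rfl⟩
  · simp [PySem.List.pyRange_neg_one_eq_nil (by norm_num : (0:Int) - 1 ≤ -1), pvLeftA]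
  · simp only [List.concat_eq_append]
    have hlen : (((Q ++ [y]).length : Nat) : Int) - 1 = (Q.length : Int) := by simp
    rw [hlen, PySem.List.pyRange_neg_one_cons (by omega : (-1:Int) < (Q.length : Int))]
    have hky : PySem.List.pyGetD ((Q ++ [y]) ++ rest) ((Q.length : Int)) none = y := by
      rw [show (Q ++ [y]) ++ rest = Q ++ y :: rest by simp]
      simp [PySem.List.pyGetD]
    have hkn : ((Q.length : Int)) ≠ n - 1 := by
      simp at hn; omega
    have hy : pvOkB y = true := hok y (by simp)
    rw [pvOk_eq_not_bad] at hy
    have hbady : pvBadA y = false := by revert hy; cases pvBadA y <;> simp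
    simp only [pvLeftA, hkn, if_false, hky, hbady, Bool.not_false, if_true]
    simp

theorem pvSetD_append (P L : List (Option Int)) (t v : Option Int) :
    PySem.List.pySetD (P ++ t :: L) (P.length : Int) v = P ++ v :: L := by
  simp [PySem.List.pySetD, PySem.List.pySet?, PySem.List.pyIdx?]

theorem pvStepA_eq (P rest2 : List (Option Int)) (t z : Option Int) (nb : Int) (n : Int)
    (hok : ∀ x ∈ P, pvOkB x = true)
    (hn : n = (P.length : Int) + (rest2.length : Int) + 2) :
    pvStepA n (P ++ (t :: rest2) ++ [z], nb) (P.length : Int)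
    = (P ++ (some (max 20 (min (pvCombine (P.getLast?.getD none) (pvFirstOk rest2)) 600)) :: rest2) ++ [z], nb + 1) := by
  have hleft := pvLeftA_eq P ((t :: rest2) ++ [z]) n hok (by omega)
  have hright := pvRightA_eq rest2 (P ++ [t]) [z] (P.length : Int)
  have e1 : P ++ (t :: rest2) ++ [z] = P ++ ((t :: rest2) ++ [z]) := by simp
  have e2 : P ++ (t :: rest2) ++ [z] = (P ++ [t]) ++ rest2 ++ [z] := by simp
  have e3 : ((P.length : Int)) + 1 = (((P ++ [t]).length : Nat) : Int) := by simp
  have e4 : n - 1 = (((P ++ [t]).length : Nat) : Int) + (rest2.length : Int) := by simp; omega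
  simp only [pvStepA]
  rw [e1, hleft]
  simp only [List.append_assoc, List.cons_append, List.nil_append, List.length_append,
    List.length_cons, List.length_nil, Nat.cast_add, Nat.cast_one, Nat.cast_zero] at hright
  rw [show ((P.length : Int) + (0 + 1)) = (P.length : Int) + 1 by ring] at hright
  rw [show n - 1 = (P.length : Int) + 1 + (rest2.length : Int) by omega]
  rw [show P ++ ((t :: rest2) ++ [z]) = P ++ t :: (rest2 ++ [z]) by simp]
  rw [hright]
  rw [show P ++ t :: (rest2 ++ [z]) = P ++ t :: (rest2 ++ [z]) from rfl, pvSetD_append]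
  rcases List.eq_nil_or_concat P with rfl | ⟨Q, y, rfl⟩
  · cases hf : pvFirstOk rest2 with
    | none => simp [pvCombine]
    | some dv => simp [pvCombine]
  · have hy := hok y (by simp)
    cases y with
    | none => simp [pvOkB] at hy
    | some p =>
      cases hf : pvFirstOk rest2 with
      | none => simp [pvCombine, List.getLast?_concat]
      | some dv =>
        simp only [List.concat_eq_append, List.getLast?_concat, Option.getD_some, pvCombine]
        simp

theorem pvMainA (S : List (Option Int)) : ∀ (P : List (Option Int)) (z : Option Int) (nb : Int),
    (∀ x ∈ P, pvOkB x = true) →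
    (pvBadIdx (P.length : Int) S).foldl (pvStepA ((P.length : Int) + (S.length : Int) + 1)) (P ++ S ++ [z], nb)
    = (P ++ (pvSpec (P.getLast?.getD none) S).1 ++ [z], nb + (pvSpec (P.getLast?.getD none) S).2) := by
  induction S with
  | nil => intro P z nb hok; simp [pvBadIdx, pvSpec]
  | cons t rest ih =>
    intro P z nb hok
    by_cases hb : pvBadA t = true
    · simp only [pvBadIdx, hb, if_true, List.foldl_cons]
      rw [pvStepA_eq P rest t z nb _ hok (by simp only [List.length_cons]; push_cast; omega)]
      set t' : Option Int := some (max 20 (min (pvCombine (P.getLast?.getD none) (pvFirstOk rest)) 600)) with ht'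
      have hok' : ∀ x ∈ P ++ [t'], pvOkB x = true := by
        intro x hx
        rcases List.mem_append.1 hx with hx | hx
        · exact hok x hx
        · rcases List.mem_singleton.1 hx with rfl
          show (decide (20 ≤ max 20 (min _ 600)) && decide (max 20 (min _ 600) ≤ 600)) = true
          simp
      have ih' := ih (P ++ [t']) z (nb + 1) hok'
      simp only [List.length_append, List.length_cons, List.length_nil, Nat.cast_add,
        Nat.cast_one, Nat.cast_zero, List.append_assoc, List.cons_append, List.nil_append,
        List.getLast?_append, List.getLast?_singleton, Option.some_or] at ih' ⊢
      rw [show ((P.length : Int) + (0 + 1) + ((rest.length : Int)) + 1) = (P.length : Int) + ((rest.length : Int) + 1) + 1 by ring] at ih'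
      rw [show ((P.length : Int) + (0 + 1)) = (P.length : Int) + 1 by ring] at ih'
      rw [ih']
      simp only [pvSpec, hb, pvOk_eq_not_bad, Bool.not_true, if_false, Bool.false_eq_true]
      simp [← ht']
      ring
    · have hb' : pvBadA t = false := by revert hb; cases pvBadA t <;> simp
      simp only [pvBadIdx, hb', if_false, Bool.false_eq_true]
      have hokt : pvOkB t = true := by rw [pvOk_eq_not_bad, hb']; rfl
      have hok' : ∀ x ∈ P ++ [t], pvOkB x = true := by
        intro x hx
        rcases List.mem_append.1 hx with hx | hx
        · exact hok x hx
        · rcases List.mem_singleton.1 hx with rfl; exact hokt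
      have ih' := ih (P ++ [t]) z nb hok'
      simp only [List.length_append, List.length_cons, List.length_nil, Nat.cast_add,
        Nat.cast_one, Nat.cast_zero, List.append_assoc, List.cons_append, List.nil_append,
        List.getLast?_append, List.getLast?_singleton, Option.some_or] at ih' ⊢
      rw [show ((P.length : Int) + (0 + 1) + ((rest.length : Int)) + 1) = (P.length : Int) + ((rest.length : Int) + 1) + 1 by ring] at ih'
      rw [show ((P.length : Int) + (0 + 1)) = (P.length : Int) + 1 by ring] at ih'
      rw [ih']
      simp only [pvSpec, hokt, if_true]
      simp

theorem pvNxtL_len (core : List (Option Int)) : (pvNxtL core).length = core.length := by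
  induction core with
  | nil => rfl
  | cons t rest ih => simp [pvNxtL, ih]

-- rebuilding the arrêts from the final fixed list: A's enumerate fold = B's zip map
theorem pvRebuild : ∀ (as : List (List (String × Option Int))) (vs X : List (Option Int)) (z : Option Int)
    (lastA : List (String × Option Int)) (c : Int) (acc : List (List (String × Option Int))),
    as.length = vs.length →
    c = (X.length : Int) + (vs.length : Int) →
    (PySem.List.enumerate (as ++ [lastA]) (X.length : Int)).foldl (fun acc p =>
        let a := PySem.Dict.ofList p.2
        let a := if p.1 < c then a.insert "temps_vers_suivant_sec" (PySem.List.pyGetD (X ++ vs ++ [z]) p.1 none) else a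
        acc ++ [a.items]) acc
    = acc ++ (List.zip as vs).map (fun p => ((PySem.Dict.ofList p.1).insert "temps_vers_suivant_sec" p.2).items)
        ++ [(PySem.Dict.ofList lastA).items] := by
  intro as
  induction as with
  | nil =>
    intro vs X z lastA c acc hlen hc
    have hvs : vs = [] := by cases vs <;> simp_all
    subst hvs
    simp only [List.nil_append, PySem.List.enumerate_cons, PySem.List.enumerate_nil, List.foldl_cons, List.foldl_nil]
    have : ¬ ((X.length : Int) < c) := by simp at hc; omega
    simp [this]
  | cons a as' ih =>
    intro vs X z lastA c acc hlen hc
    cases vs with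
    | nil => simp at hlen
    | cons v vs' =>
      simp only [List.cons_append, PySem.List.enumerate_cons, List.foldl_cons]
      have hlt : ((X.length : Int)) < c := by simp at hlen hc ⊢; omega
      have hget : PySem.List.pyGetD (X ++ (v :: vs') ++ [z]) ((X.length : Int)) none = v := by
        rw [show X ++ (v :: vs') ++ [z] = X ++ v :: (vs' ++ [z]) by simp]
        simp [PySem.List.pyGetD]
      simp only [hlt, if_true, hget]
      have ih' := ih vs' (X ++ [v]) z lastA c
        (acc ++ [((PySem.Dict.ofList a).insert "temps_vers_suivant_sec" v).items])
        (by simpa using hlen) (by simp at hc ⊢; omega)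
      simp only [List.length_append, List.length_cons, List.length_nil, Nat.cast_add, Nat.cast_one,
        Nat.cast_zero, List.append_assoc, List.cons_append, List.nil_append] at ih' ⊢
      rw [show ((X.length : Int) + (0 + 1)) = (X.length : Int) + 1 by ring] at ih'
      rw [ih']
      simp

theorem interpolate_times_py_spec : Claim_equal_interpolate_times_py := by
  intro arrets ligne_id _
  show interpolate_times_py arrets ligne_id = interpolate_times_py_alt arrets ligne_id
  rcases List.eq_nil_or_concat arrets with rfl | ⟨A0, lastA, rfl⟩
  · rfl
  · simp only [List.concat_eq_append]
    have hmap : (A0 ++ [lastA]).map pvGetTime = A0.map pvGetTime ++ [pvGetTime lastA] := by simp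
    set core := A0.map pvGetTime with hcore
    set z := pvGetTime lastA with hz
    have hlenc : core.length = A0.length := by simp [hcore]
    have hlens : (pvSpec none core).1.length = A0.length := by rw [pvSpec_len, hlenc]
    have hbad := pvBadIdx_eq_filter core ([] : List (Option Int)) [z]
    simp only [List.length_nil, Nat.cast_zero, List.nil_append, zero_add] at hbad
    have hmain := pvMainA core [] z 0 (by intro x hx; simp at hx)
    simp only [List.length_nil, Nat.cast_zero, List.nil_append, zero_add, List.getLast?_nil,
      Option.getD_none] at hmain
    have hreb := pvRebuild A0 (pvSpec none core).1 [] z lastA ((core.length : Nat) : Int) []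
      hlens.symm (by simp [hlens, hlenc])
    simp only [List.length_nil, Nat.cast_zero, List.nil_append] at hreb
    have hslice : PySem.List.slice (core ++ [z]) none (some (((A0 ++ [lastA]).length : Int) - 1)) = core := by
      rw [PySem.List.slice_to _ (by simp)]
      rw [show (((A0 ++ [lastA]).length : Int) - 1).toNat = core.length by simp [hlenc]]
      exact List.take_left
    have hzip1 : List.zip (core ++ [z]) (pvNxtL core) = List.zip core (pvNxtL core) := by
      rw [show pvNxtL core = pvNxtL core ++ [] by simp]
      rw [List.zip_append (by rw [pvNxtL_len])]
      simp
    have hzip2 : List.zip (A0 ++ [lastA]) (pvSpec none core).1 = List.zip A0 (pvSpec none core).1 := by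
      rw [show (pvSpec none core).1 = (pvSpec none core).1 ++ [] by simp]
      rw [List.zip_append (by rw [hlens])]
      simp
    have hget : PySem.List.pyGet? (A0 ++ [lastA]) (-1) = some lastA := by
      rw [PySem.List.pyGet?_neg_one, List.getLast?_concat]
    simp only [interpolate_times_py, interpolate_times_py_alt, hmap, hslice, pvNxtB_eq,
      hzip1, pvFwdB_eq_spec, hzip2, hget]
    rw [show ((((A0 ++ [lastA]).length : Nat) : Int)) - 1 = ((core.length : Nat) : Int) by simp [hlenc]]
    rw [show ((((A0 ++ [lastA]).length : Nat) : Int)) = ((core.length : Nat) : Int) + 1 by simp [hlenc]]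
    rw [hbad, hmain, hreb]
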